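-- pv_equiv track=rewrite | github.com/jalddak/ps_training | python/with_java/programmers/level 2/* 주식가격.Py | solution
-- ===== SOURCE A (Python) =====
-- def solution(prices):
--     answer = [0 for _ in range(len(prices))]
--     stack = []
--     for i in range(len(prices)):
--         while stack and stack[-1][1] > prices[i]:
--             info = stack.pop()
--             answer[info[0]] = i - info[0]
--         stack.append((i, prices[i]))
--     while stack:
--         info = stack.pop()
--         answer[info[0]] = len(prices)-1-info[0]
--     return answer
-- ===== SOURCE B (Python) =====
-- def solution(prices):
--     n = len(prices)
--     answer = []
--     for i in range(n):
--         cnt = 0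
--         for j in range(i + 1, n):
--             cnt += 1
--             if prices[j] < prices[i]:
--                 break
--         answer.append(cnt)
--     return answer
-- ===== Notes on version B (the rewrite author's own statement) =====
-- stated objective: simpler
-- what changed: Replaced the monotonic index/price stack with deferred answer writes by a direct per-index forward scan that counts seconds until the first strictly smaller price (quadratic but shorter and plainer).
import Mathlib
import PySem

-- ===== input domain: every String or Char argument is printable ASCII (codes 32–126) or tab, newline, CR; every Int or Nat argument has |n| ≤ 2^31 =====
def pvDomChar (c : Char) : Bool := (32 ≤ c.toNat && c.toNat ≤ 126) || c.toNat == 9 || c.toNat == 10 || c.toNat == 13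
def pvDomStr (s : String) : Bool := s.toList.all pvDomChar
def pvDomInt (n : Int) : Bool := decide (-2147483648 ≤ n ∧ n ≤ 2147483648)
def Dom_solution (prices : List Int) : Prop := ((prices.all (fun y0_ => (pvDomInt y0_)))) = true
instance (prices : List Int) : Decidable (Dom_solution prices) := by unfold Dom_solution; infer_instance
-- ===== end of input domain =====

-- B replaces A's monotonic-stack bookkeeping with a direct per-index forward scan (simpler, quadratic).

-- ===== PORT A =====
-- inner `while stack and stack[-1][1] > prices[i]` loop (stack held head = top)
def popA (prices : List Int) (ans : List Int) (st : List (Nat × Int)) (i : Nat) :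
    List Int × List (Nat × Int) :=
  match st with
  | [] => (ans, [])
  | (j, q) :: rest =>
    if prices.getD i 0 < q then popA prices (ans.set j ((i : Int) - (j : Int))) rest i
    else (ans, (j, q) :: rest)

-- one iteration of `for i in range(len(prices))`
def stepA (prices : List Int) (s : List Int × List (Nat × Int)) (i : Nat) :
    List Int × List (Nat × Int) :=
  let t := popA prices s.1 s.2 i
  (t.1, (i, prices.getD i 0) :: t.2)

-- the trailing `while stack` loop
def drainA (n : Nat) (ans : List Int) (st : List (Nat × Int)) : List Int :=
  match st with
  | [] => ans
  | (j, _) :: rest => drainA n (ans.set j ((n : Int) - 1 - (j : Int))) rest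

def solution (prices : List Int) : List Int :=
  let n := prices.length
  let s := (List.range n).foldl (stepA prices) (List.replicate n 0, [])
  drainA n s.1 s.2

-- ===== PORT B =====
-- inner `for j in range(i+1, n): cnt += 1; if prices[j] < prices[i]: break`
def countB (prices : List Int) (p : Int) (js : List Nat) (cnt : Int) : Int :=
  match js with
  | [] => cnt
  | j :: rest =>
    if prices.getD j 0 < p then cnt + 1 else countB prices p rest (cnt + 1)

def solution_alt (prices : List Int) : List Int :=
  let n := prices.length
  (List.range n).map (fun i =>
    countB prices (prices.getD i 0) (List.range' (i + 1) (n - (i + 1))) 0)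

-- ===== PRECONDITION & SPEC =====
def Spec_solution (prices : List Int) (out : List Int) : Prop := out = solution_alt prices
instance (prices : List Int) (out : List Int) : Decidable (Spec_solution prices out) := by unfold Spec_solution; infer_instance

-- ===== CLAIM (what is proved, stated in full; the proofs are below) =====
def Claim_equal_solution : Prop := ∀ (prices : List Int), Dom_solution prices → Spec_solution prices (solution prices)

-- ===== LEMMAS AND PROOFS =====

-- first index k in (j, i) with prices[k] < prices[j]
def fd (prices : List Int) (i j : Nat) : Option Nat :=
  (List.range' (j + 1) (i - (j + 1))).find? (fun k => decide (prices.getD k 0 < prices.getD j 0))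

-- A's answer cell for j after the prefix [0, i) has been processed
def ansAt (prices : List Int) (i j : Nat) : Int :=
  match fd prices i j with
  | some k => (k : Int) - (j : Int)
  | none => 0

-- "j is still on the stack after prefix [0, i)": no strict drop in (j, i)
def keeps (prices : List Int) (i j : Nat) : Bool :=
  (List.range' (j + 1) (i - (j + 1))).all (fun k => decide (prices.getD j 0 ≤ prices.getD k 0))

-- the stack's indices after prefix [0, i), top first (decreasing)
def active (prices : List Int) (i : Nat) : List Nat :=
  ((List.range i).filter (keeps prices i)).reverse

lemma keeps_iff_fd (prices : List Int) (i j : Nat) :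
    keeps prices i j = true ↔ fd prices i j = none := by
  simp only [keeps, fd, List.all_eq_true, List.find?_eq_none, decide_eq_true_eq]
  constructor
  · intro h k hk; simpa using not_lt.mpr (h k hk)
  · intro h k hk; exact not_lt.mp (by simpa using h k hk)

lemma range'_concat_of_lt {j i : Nat} (h : j < i) :
    List.range' (j + 1) (i + 1 - (j + 1)) = List.range' (j + 1) (i - (j + 1)) ++ [i] := by
  have h1 : i + 1 - (j + 1) = (i - (j + 1)) + 1 := by omega
  rw [h1, List.range'_concat]
  congr 1
  simp; omega

lemma ansAt_succ (prices : List Int) (i j : Nat) :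
    ansAt prices (i + 1) j =
      if j < i ∧ keeps prices i j = true ∧ prices.getD i 0 < prices.getD j 0
      then (i : Int) - (j : Int) else ansAt prices i j := by
  by_cases hji : j < i
  · have hsplit : fd prices (i + 1) j =
        (fd prices i j).or
          (List.find? (fun k => decide (prices.getD k 0 < prices.getD j 0)) [i]) := by
      rw [fd, fd, range'_concat_of_lt hji, List.find?_append]
    by_cases hk : keeps prices i j = true
    · have hn : fd prices i j = none := (keeps_iff_fd prices i j).mp hk
      by_cases hd : prices.getD i 0 < prices.getD j 0
      · have hfind : List.find? (fun k => decide (prices.getD k 0 < prices.getD j 0)) [i]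
            = some i := by
          simp only [List.find?_cons, decide_eq_true hd]
        rw [ansAt, hsplit, hn, Option.none_or, hfind, if_pos ⟨hji, hk, hd⟩]
      · have hfind : List.find? (fun k => decide (prices.getD k 0 < prices.getD j 0)) [i]
            = none := by
          simp only [List.find?_cons, decide_eq_false hd, List.find?_nil]
        rw [ansAt, hsplit, hn, Option.none_or, hfind,
            if_neg (by intro h; exact hd h.2.2), ansAt, hn]
    · have : fd prices i j ≠ none := fun h => hk ((keeps_iff_fd prices i j).mpr h)
      obtain ⟨k, hk'⟩ := Option.ne_none_iff_exists'.mp this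
      rw [ansAt, hsplit, hk', Option.some_or, if_neg (by intro h; exact hk h.2.1), ansAt, hk']
  · have h0 : i + 1 - (j + 1) = 0 ∧ i - (j + 1) = 0 := by omega
    simp [ansAt, fd, h0.1, h0.2, hji]

lemma keeps_succ (prices : List Int) (i j : Nat) (h : j < i) :
    keeps prices (i + 1) j =
      (keeps prices i j && decide (prices.getD j 0 ≤ prices.getD i 0)) := by
  rw [keeps, range'_concat_of_lt h, List.all_append, keeps]
  simp

lemma active_succ (prices : List Int) (i : Nat) :
    active prices (i + 1) =
      i :: (active prices i).filter (fun j => decide (prices.getD j 0 ≤ prices.getD i 0)) := by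
  rw [active, active, List.range_succ, List.filter_append]
  have h1 : (List.range i).filter (keeps prices (i + 1)) =
      ((List.range i).filter (keeps prices i)).filter
        (fun j => decide (prices.getD j 0 ≤ prices.getD i 0)) := by
    rw [List.filter_filter]
    apply List.filter_congr
    intro j hj
    rw [keeps_succ prices i j (List.mem_range.mp hj)]
    exact Bool.and_comm _ _
  have h2 : keeps prices (i + 1) i = true := by
    simp [keeps, Nat.sub_self]
  rw [h1]
  simp [List.filter_cons, h2, List.filter_reverse]

lemma mem_active_lt (prices : List Int) (i : Nat) {j : Nat} (h : j ∈ active prices i) : j < i := by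
  rw [active, List.mem_reverse, List.mem_filter, List.mem_range] at h
  exact h.1

lemma mem_active_keeps (prices : List Int) (i : Nat) {j : Nat} (h : j ∈ active prices i) :
    keeps prices i j = true := by
  rw [active, List.mem_reverse, List.mem_filter] at h
  exact h.2

lemma active_nodup (prices : List Int) (i : Nat) : (active prices i).Nodup := by
  rw [active, List.nodup_reverse]
  exact (List.nodup_range).filter _

lemma active_pairwise_gt (prices : List Int) (i : Nat) :
    (active prices i).Pairwise (· > ·) := by
  rw [active]
  exact (List.pairwise_lt_range.filter _).reverse.imp (by intro a b h; simpa using h)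

-- a later (deeper) stack entry has a price ≤ an earlier one's
lemma active_price_le (prices : List Int) (i : Nat) :
    (active prices i).Pairwise (fun a b => prices.getD b 0 ≤ prices.getD a 0) := by
  refine (active_pairwise_gt prices i).imp_of_mem ?_
  intro a b ha hb hab
  have hk := mem_active_keeps prices i hb
  rw [keeps, List.all_eq_true] at hk
  have : a ∈ List.range' (b + 1) (i - (b + 1)) := by
    rw [List.mem_range'_1]
    exact ⟨by omega, by have := mem_active_lt prices i ha; omega⟩
  simpa using hk a this

lemma popA_eq (prices : List Int) (i : Nat) :
    ∀ (st : List (Nat × Int)) (ans : List Int),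
    popA prices ans st i =
      ((st.takeWhile (fun e => decide (prices.getD i 0 < e.2))).foldl
         (fun a e => a.set e.1 ((i : Int) - (e.1 : Int))) ans,
       st.dropWhile (fun e => decide (prices.getD i 0 < e.2))) := by
  intro st
  induction st with
  | nil => intro ans; simp [popA]
  | cons e rest ih =>
    intro ans
    obtain ⟨j, q⟩ := e
    by_cases h : prices.getD i 0 < q
    · simp only [popA, List.takeWhile_cons, List.dropWhile_cons, decide_eq_true h,
        if_true, List.foldl_cons, if_pos h, ih]
    · simp only [popA, List.takeWhile_cons, List.dropWhile_cons, decide_eq_false h,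
        Bool.false_eq_true, if_false, if_neg h, List.foldl_nil]

lemma takeWhile_dropWhile_filter {α : Type} (p : α → Bool) :
    ∀ (l : List α), l.Pairwise (fun a b => p a = false → p b = false) →
    l.takeWhile p = l.filter p ∧ l.dropWhile p = l.filter (fun a => ! p a) := by
  intro l
  induction l with
  | nil => intro _; simp
  | cons a rest ih =>
    intro hp
    rw [List.pairwise_cons] at hp
    obtain ⟨hd, hrest⟩ := hp
    by_cases ha : p a = true
    · simp [ha, (ih hrest).1, (ih hrest).2]
    · rw [Bool.not_eq_true] at ha
      have hall : ∀ b ∈ rest, p b = false := fun b hb => hd b hb ha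
      constructor
      · simp only [List.takeWhile_cons, List.filter_cons, ha]
        simp only [Bool.false_eq_true, if_false]
        symm
        rw [List.filter_eq_nil_iff]
        intro b hb; simp [hall b hb]
      · simp only [List.dropWhile_cons, List.filter_cons, ha]
        simp only [Bool.false_eq_true, if_false, Bool.not_false, if_true]
        congr 1
        symm
        rw [List.filter_eq_self]
        intro b hb; simp [hall b hb]

lemma foldl_set_getElem? (f : Nat → Int) :
    ∀ (l : List Nat) (ans : List Int) (j : Nat), l.Nodup →
    (l.foldl (fun a j' => a.set j' (f j')) ans)[j]? =
      if j ∈ l ∧ j < ans.length then some (f j) else ans[j]? := by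
  intro l
  induction l with
  | nil => intro ans j _; simp
  | cons a rest ih =>
    intro ans j hnd
    rw [List.nodup_cons] at hnd
    rw [List.foldl_cons, ih _ _ hnd.2]
    by_cases hj : j ∈ rest
    · have hne : j ≠ a := fun h => hnd.1 (h ▸ hj)
      simp only [List.length_set, List.getElem?_set, hj, List.mem_cons]
      simp [hne, Ne.symm hne]
    · simp only [hj, List.getElem?_set, List.length_set, List.mem_cons]
      by_cases hja : j = a
      · subst hja
        by_cases hlen : j < ans.length <;> simp [hlen]
      · simp [hja, hj, Ne.symm hja]

lemma getElem?_map_range (g : Nat → Int) (n j : Nat) :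
    ((List.range n).map g)[j]? = if j < n then some (g j) else none := by
  by_cases h : j < n
  · rw [List.getElem?_map, List.getElem?_range h]; simp [h]
  · rw [List.getElem?_eq_none (by simpa using not_lt.mp h)]; simp [h]

lemma loop_inv (prices : List Int) :
    ∀ (i : Nat), i ≤ prices.length →
    (List.range i).foldl (stepA prices) (List.replicate prices.length 0, []) =
      ((List.range prices.length).map (ansAt prices i),
       (active prices i).map (fun j => (j, prices.getD j 0))) := by
  intro i
  induction i with
  | zero =>
    intro _
    simp only [List.range_zero, List.foldl_nil]
    refine Prod.ext ?_ ?_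
    · apply List.ext_getElem?
      intro j
      rw [getElem?_map_range]
      by_cases h : j < prices.length
      · simp [h, List.getElem?_replicate, ansAt, fd]
      · simp [h, List.getElem?_eq_none (l := List.replicate prices.length (0:Int)) (by simpa using not_lt.mp h)]
    · simp [active]
  | succ i ih =>
    intro hi
    have hi' : i ≤ prices.length := by omega
    rw [List.range_succ, List.foldl_append, ih hi', List.foldl_cons, List.foldl_nil]
    rw [stepA]
    have hpair := (active_price_le prices i).map (fun j => (j, prices.getD j 0))
      (S := fun a b => (fun e => decide (prices.getD i 0 < e.2)) a = false →
        (fun e => decide (prices.getD i 0 < e.2)) b = false)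
      (by intro a b h; simp only [decide_eq_false_iff_not, not_lt]; intro h2; exact le_trans h h2)
    have htd := takeWhile_dropWhile_filter _ _ hpair
    rw [popA_eq, htd.1, htd.2]
    simp only [List.filter_map]
    have hcomp1 : ((fun e => decide (prices.getD i 0 < e.2)) ∘ (fun j => (j, prices.getD j 0)))
        = fun j => decide (prices.getD i 0 < prices.getD j 0) := rfl
    have hcomp2 : ((fun e => ! decide (prices.getD i 0 < e.2)) ∘ (fun j => (j, prices.getD j 0)))
        = fun j => decide (prices.getD j 0 ≤ prices.getD i 0) := by
      funext j
      simp only [Function.comp]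
      by_cases h : prices.getD i 0 < prices.getD j 0
      · rw [decide_eq_true h, decide_eq_false (not_le.mpr h), Bool.not_true]
      · rw [decide_eq_false h, decide_eq_true (not_lt.mp h), Bool.not_false]
    rw [hcomp1, hcomp2, List.foldl_map]
    refine Prod.ext ?_ ?_
    · -- answer array
      apply List.ext_getElem?
      intro j
      have hnd : ((active prices i).filter
          (fun j => decide (prices.getD i 0 < prices.getD j 0))).Nodup :=
        (active_nodup prices i).filter _
      rw [foldl_set_getElem? _ _ _ _ hnd]
      rw [getElem?_map_range, getElem?_map_range]
      simp only [List.length_map, List.length_range, List.mem_filter, decide_eq_true_eq]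
      by_cases hjn : j < prices.length
      · simp only [hjn, and_true, if_true]
        rw [ansAt_succ]
        by_cases hmem : j ∈ active prices i ∧ prices.getD i 0 < prices.getD j 0
        · have h1 : j < i := mem_active_lt prices i hmem.1
          have h2 := mem_active_keeps prices i hmem.1
          rw [if_pos hmem, if_pos ⟨h1, h2, hmem.2⟩]
        · have hcond : ¬ (j < i ∧ keeps prices i j = true ∧ prices.getD i 0 < prices.getD j 0) := by
            intro ⟨h1, h2, h3⟩
            exact hmem ⟨by rw [active, List.mem_reverse, List.mem_filter]; exact ⟨List.mem_range.mpr h1, h2⟩, h3⟩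
          rw [if_neg hmem, if_neg hcond]
      · simp [hjn]
    · -- stack
      rw [active_succ]
      simp only [List.map_cons]

lemma drainA_eq_foldl (n : Nat) :
    ∀ (st : List (Nat × Int)) (ans : List Int),
    drainA n ans st = st.foldl (fun a e => a.set e.1 ((n : Int) - 1 - (e.1 : Int))) ans := by
  intro st
  induction st with
  | nil => intro ans; simp [drainA]
  | cons e rest ih => intro ans; obtain ⟨j, q⟩ := e; simp [drainA, ih]

lemma countB_eq (prices : List Int) (p : Int) :
    ∀ (m s : Nat) (c : Int),
    countB prices p (List.range' s m) c =
      match (List.range' s m).find? (fun k => decide (prices.getD k 0 < p)) with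
      | some k => c + ((k : Int) - (s : Int) + 1)
      | none => c + (m : Int) := by
  intro m
  induction m with
  | zero => intro s c; simp [countB]
  | succ m ih =>
    intro s c
    rw [List.range'_succ, countB, List.find?_cons]
    by_cases h : prices.getD s 0 < p
    · simp only [eq_true h, decide_true, if_true]
      push_cast; ring
    · simp only [h, decide_false, if_false]
      rw [ih]
      rcases hf : (List.range' (s + 1) m).find? (fun k => decide (prices.getD k 0 < p)) with _ | k
      · push_cast; ring
      · have hk : k ∈ List.range' (s + 1) m := List.mem_of_find?_eq_some hf
        have hk' : s + 1 ≤ k := (List.mem_range'_1.mp hk).1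
        push_cast; ring

lemma solution_alt_elem (prices : List Int) (j : Nat) (hj : j < prices.length) :
    countB prices (prices.getD j 0) (List.range' (j + 1) (prices.length - (j + 1))) 0 =
      match fd prices prices.length j with
      | some k => (k : Int) - (j : Int)
      | none => (prices.length : Int) - 1 - (j : Int) := by
  rw [countB_eq, fd]
  rcases hf : (List.range' (j + 1) (prices.length - (j + 1))).find?
      (fun k => decide (prices.getD k 0 < prices.getD j 0)) with _ | k
  · simp only []
    rw [Nat.cast_sub (by omega : j + 1 ≤ prices.length)]
    push_cast; ring
  · simp only []
    push_cast; ring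

-- ===== VERDICT (by name: the statement is the Claim_ definition above) =====
theorem solution_spec : Claim_equal_solution := by
  intro prices _
  unfold Spec_solution
  simp only [solution, solution_alt]
  rw [loop_inv prices prices.length (le_refl _)]
  simp only []
  rw [drainA_eq_foldl, List.foldl_map]
  apply List.ext_getElem?
  intro j
  have hnd := active_nodup prices prices.length
  rw [foldl_set_getElem? _ _ _ _ hnd, getElem?_map_range, getElem?_map_range]
  simp only [List.length_map, List.length_range]
  by_cases hj : j < prices.length
  · simp only [hj, and_true, if_true]
    rw [solution_alt_elem prices j hj]
    by_cases hmem : j ∈ active prices prices.length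
    · have hk := mem_active_keeps prices _ hmem
      have hn : fd prices prices.length j = none := (keeps_iff_fd _ _ _).mp hk
      simp [hmem, hn]
    · have hk : keeps prices prices.length j ≠ true := by
        intro h
        exact hmem (by rw [active, List.mem_reverse, List.mem_filter]; exact ⟨List.mem_range.mpr hj, h⟩)
      have : fd prices prices.length j ≠ none := fun h => hk ((keeps_iff_fd _ _ _).mpr h)
      obtain ⟨k, hkk⟩ := Option.ne_none_iff_exists'.mp this
      simp [hmem, hkk, ansAt]
  · simp [hj]
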